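-- pv_equiv track=rewrite | github.com/YashvardhanPawar20/bajaj-finserv-bfhl-api | app/logic.py | extract_alphabetic_chars
-- ===== SOURCE A (Python) =====
-- from typing import List, Dict, Any
--
-- def extract_alphabetic_chars(data: List[str]) -> str:
--     """
--     Extract all alphabetic characters from input data, reverse order,
--     and apply alternating case starting with uppercase.
--
--     Args:
--         data: List of input strings
--
--     Returns:
--         Processed string with alternating case
--     """
--     # Extract all alphabetic characters maintaining order
--     chars = []
--     for item in data:
--         for char in item:
--             if char.isalpha():
--                 chars.append(char)
--
--     # Reverse the character sequence
--     chars_reversed = chars[::-1]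
--
--     # Apply alternating case starting with uppercase at index 0
--     result = ""
--     for i, char in enumerate(chars_reversed):
--         if i % 2 == 0:
--             result += char.upper()
--         else:
--             result += char.lower()
--
--     return result
-- ===== SOURCE B (Python) =====
-- def extract_alphabetic_chars(data):
--     out = []
--     upper = True
--     for item in reversed(data):
--         for ch in reversed(item):
--             if ch.isalpha():
--                 out.append(ch.upper() if upper else ch.lower())
--                 upper = not upper
--     return ''.join(out)
-- ===== Notes on version B (the rewrite author's own statement) =====
-- stated objective: alternative
-- what changed: Replaces A's three passes (collect letters, reverse via slice, enumerate-indexed recasing) with one fused pass that walks the list and each string in reverse, applying a case toggle on the fly and joining once at the end.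
import Mathlib
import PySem

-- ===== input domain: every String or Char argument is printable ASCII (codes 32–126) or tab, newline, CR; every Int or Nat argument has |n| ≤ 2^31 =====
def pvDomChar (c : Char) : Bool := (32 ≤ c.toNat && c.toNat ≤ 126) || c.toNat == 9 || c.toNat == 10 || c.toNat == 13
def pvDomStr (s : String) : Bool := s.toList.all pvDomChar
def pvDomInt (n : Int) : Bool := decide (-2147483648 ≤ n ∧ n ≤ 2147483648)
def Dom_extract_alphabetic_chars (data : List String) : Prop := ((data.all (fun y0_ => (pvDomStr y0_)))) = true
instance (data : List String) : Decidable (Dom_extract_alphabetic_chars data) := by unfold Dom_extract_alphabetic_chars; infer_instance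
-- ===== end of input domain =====

-- B fuses A's three passes (collect letters / reverse slice / enumerate recasing) into one
-- reverse traversal with a case toggle; equivalence is proved, no speed claim.

-- ===== PORT A =====
def extract_alphabetic_chars (data : List String) : String :=
  -- chars = []; for item in data: for char in item: if char.isalpha(): chars.append(char)
  let chars : List Char := data.foldl (fun acc item =>
    item.toList.foldl (fun a c => if PySem.Chars.isalpha c then a ++ [c] else a) acc) []
  -- chars_reversed = chars[::-1]
  let chars_reversed : List Char := (PySem.List.slice? chars none none (-1)).getD []
  -- for i, char in enumerate(chars_reversed): result += char.upper() / char.lower()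
  let result : List Char := (PySem.List.enumerate chars_reversed 0).foldl
    (fun r p => if PySem.Int.mod p.1 2 = 0 then r ++ [PySem.Chars.upperChar p.2]
                else r ++ [PySem.Chars.lowerChar p.2]) []
  String.ofList result

-- ===== PORT B =====
-- one step of B's fused loop: skip non-letters, else emit the toggled-case char and flip
def altStep (st : List Char × Bool) (c : Char) : List Char × Bool :=
  if PySem.Chars.isalpha c then
    (st.1 ++ [if st.2 then PySem.Chars.upperChar c else PySem.Chars.lowerChar c], !st.2)
  else st

def extract_alphabetic_chars_alt (data : List String) : String :=
  String.ofList
    (data.reverse.foldl (fun st item => item.toList.reverse.foldl altStep st) ([], true)).1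

-- ===== PRECONDITION & SPEC =====
def Spec_extract_alphabetic_chars (data : List String) (out : String) : Prop := out = extract_alphabetic_chars_alt data
instance (data : List String) (out : String) : Decidable (Spec_extract_alphabetic_chars data out) := by unfold Spec_extract_alphabetic_chars; infer_instance

-- ===== CLAIM (what is proved, stated in full; the proofs are below) =====
def Claim_equal_extract_alphabetic_chars : Prop := ∀ (data : List String), Dom_extract_alphabetic_chars data → Spec_extract_alphabetic_chars data (extract_alphabetic_chars data)

-- ===== LEMMAS AND PROOFS =====

def altCase : Bool → List Char → List Char
  | _, [] => []
  | u, c :: cs => (if u then PySem.Chars.upperChar c else PySem.Chars.lowerChar c) :: altCase (!u) cs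

def flipN (u : Bool) (n : Nat) : Bool := if n % 2 = 0 then u else !u

theorem flipN_not (u : Bool) (n : Nat) : flipN (!u) n = flipN u (n + 1) := by
  unfold flipN
  rcases Nat.mod_two_eq_zero_or_one n with h | h <;>
    simp [h, Nat.add_mod, Bool.not_not]

theorem flipN_flipN (u : Bool) (m n : Nat) : flipN (flipN u m) n = flipN u (m + n) := by
  unfold flipN
  rcases Nat.mod_two_eq_zero_or_one m with hm | hm <;>
    rcases Nat.mod_two_eq_zero_or_one n with hn | hn <;>
      simp [hm, hn, Nat.add_mod, Bool.not_not]

theorem lemA_inner (cs : List Char) : ∀ (acc : List Char),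
    cs.foldl (fun a c => if PySem.Chars.isalpha c then a ++ [c] else a) acc
      = acc ++ cs.filter PySem.Chars.isalpha := by
  induction cs with
  | nil => simp
  | cons c cs ih =>
    intro acc
    by_cases h : PySem.Chars.isalpha c = true <;>
      simp [h, ih]

theorem lemA_chars (ds : List String) : ∀ (acc : List Char),
    ds.foldl (fun acc item =>
        item.toList.foldl (fun a c => if PySem.Chars.isalpha c then a ++ [c] else a) acc) acc
      = acc ++ ds.flatMap (fun s => s.toList.filter PySem.Chars.isalpha) := by
  induction ds with
  | nil => simp
  | cons d ds ih =>
    intro acc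
    rw [List.foldl_cons, lemA_inner, ih, List.flatMap_cons, List.append_assoc]

theorem lemA_case (cs : List Char) : ∀ (s : Nat) (r : List Char),
    (PySem.List.enumerate cs (s : Int)).foldl
        (fun r p => if PySem.Int.mod p.1 2 = 0 then r ++ [PySem.Chars.upperChar p.2]
                    else r ++ [PySem.Chars.lowerChar p.2]) r
      = r ++ altCase (decide (s % 2 = 0)) cs := by
  induction cs with
  | nil => simp [PySem.List.enumerate_nil, altCase]
  | cons c cs ih =>
    intro s r
    rw [PySem.List.enumerate_cons]
    have hcast : (s : Int) + 1 = ((s + 1 : Nat) : Int) := by push_cast; ring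
    have hmod : PySem.Int.mod (s : Int) 2 = ((s % 2 : Nat) : Int) := by
      simp [PySem.Int.mod, Int.fmod_eq_emod]
    have hflip : (!decide (s % 2 = 0)) = decide ((s + 1) % 2 = 0) := by
      rcases Nat.mod_two_eq_zero_or_one s with h | h <;> simp [h, Nat.add_mod]
    rw [List.foldl_cons, hcast, ih, hmod]
    rcases Nat.mod_two_eq_zero_or_one s with h | h <;>
      simp [h, altCase, ← hflip]

theorem altCase_append (xs ys : List Char) : ∀ (u : Bool),
    altCase u (xs ++ ys) = altCase u xs ++ altCase (flipN u xs.length) ys := by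
  induction xs with
  | nil => intro u; simp [altCase, flipN]
  | cons x xs ih =>
    intro u
    simp [altCase, ih, flipN_not]

theorem lemB_inner (cs : List Char) : ∀ (acc : List Char) (u : Bool),
    cs.foldl altStep (acc, u)
      = (acc ++ altCase u (cs.filter PySem.Chars.isalpha),
         flipN u (cs.filter PySem.Chars.isalpha).length) := by
  induction cs with
  | nil => simp [altCase, flipN]
  | cons c cs ih =>
    intro acc u
    by_cases h : PySem.Chars.isalpha c = true
    · simp [altStep, h, ih, altCase, flipN_not]
    · simp [altStep, h, ih]

theorem lemB_outer (ds : List String) : ∀ (acc : List Char) (u : Bool),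
    ds.foldl (fun st item => item.toList.reverse.foldl altStep st) (acc, u)
      = (acc ++ altCase u (ds.flatMap (fun s => s.toList.reverse.filter PySem.Chars.isalpha)),
         flipN u (ds.flatMap (fun s => s.toList.reverse.filter PySem.Chars.isalpha)).length) := by
  induction ds with
  | nil => simp [altCase, flipN]
  | cons d ds ih =>
    intro acc u
    simp only [List.foldl_cons, lemB_inner, ih, List.flatMap_cons, altCase_append,
      List.append_assoc, flipN_flipN, List.length_append]

-- ===== VERDICT (by name: the statement is the Claim_ definition above) =====
theorem lemA_case0 (cs : List Char) :
    (PySem.List.enumerate cs 0).foldl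
        (fun r p => if PySem.Int.mod p.1 2 = 0 then r ++ [PySem.Chars.upperChar p.2]
                    else r ++ [PySem.Chars.lowerChar p.2]) []
      = altCase true cs := by
  have h := lemA_case cs 0 []
  simpa using h

theorem extract_alphabetic_chars_spec : Claim_equal_extract_alphabetic_chars := by
  intro data _
  unfold Spec_extract_alphabetic_chars
  simp only [extract_alphabetic_chars, extract_alphabetic_chars_alt,
    PySem.List.slice?_none_none_neg_one, Option.getD_some, lemA_chars, lemB_outer,
    List.nil_append, lemA_case0]
  congr 1
  rw [List.reverse_flatMap]
  simp only [Function.comp_def, List.filter_reverse]
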